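-- pv_equiv track=rewrite | github.com/pcribierdelande/AoC2024 | Day08/day08.py | get_antinodes_from_two_antenas
-- ===== SOURCE A (Python) =====
-- def get_antinodes_from_two_antenas(
--     antena1: tuple[int, int], antena2: tuple[int, int], x_lim: int, y_lim: int
-- ) -> tuple[list[tuple[int, int]], list[tuple[int, int]]]:
--     x1, y1 = antena1
--     x2, y2 = antena2
--     diff_x = x1 - x2
--     diff_y = y1 - y2
--     possible1 = (x1 + diff_x, y1 + diff_y)
--     possible2 = (x2 - diff_x, y2 - diff_y)
--
--     possible_antinodes1 = []
--     possible_antinodes2 = []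
--     while check_antinode_in_grid(possible1, x_lim, y_lim):
--         possible_antinodes1.append(possible1)
--         possible1 = (possible1[0] + diff_x, possible1[1] + diff_y)
--     while check_antinode_in_grid(possible2, x_lim, y_lim):
--         possible_antinodes2.append(possible2)
--         possible2 = (possible2[0] - diff_x, possible2[1] - diff_y)
--     return (possible_antinodes1, possible_antinodes2)
--
-- def check_antinode_in_grid(
--     antinode_coord: tuple[int, int], x_lim: int, y_lim: int
-- ) -> bool:
--     x, y = antinode_coord
--     return not (x < 0 or y < 0 or x >= x_lim or y >= y_lim)
-- ===== SOURCE B (Python) =====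
-- def get_antinodes_from_two_antenas(
--     antena1: tuple[int, int], antena2: tuple[int, int], x_lim: int, y_lim: int
-- ) -> tuple[list[tuple[int, int]], list[tuple[int, int]]]:
--     x1, y1 = antena1
--     x2, y2 = antena2
--     diff_x = x1 - x2
--     diff_y = y1 - y2
--
--     def axis_count(c: int, s: int, lim: int):
--         # number of leading steps j = 1, 2, ... with 0 <= c + j*s < lim
--         # (None means this axis never stops the walk)
--         if s == 0:
--             return None if 0 <= c < lim else 0
--         if s > 0:
--             lo = -(c // s)            # ceil(-c / s)
--             hi = (lim - 1 - c) // s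
--         else:
--             lo = (c - lim) // (-s) + 1
--             hi = c // (-s)
--         return hi if lo <= 1 <= hi else 0
--
--     def ray(sx: int, sy: int, dx: int, dy: int):
--         nx = axis_count(sx, dx, x_lim)
--         ny = axis_count(sy, dy, y_lim)
--         if nx is None and ny is None:
--             raise ValueError("antinode line never leaves the grid")
--         n = ny if nx is None else nx if ny is None else min(nx, ny)
--         return [(sx + j * dx, sy + j * dy) for j in range(1, n + 1)]
--
--     return (ray(x1, y1, diff_x, diff_y), ray(x2, y2, -diff_x, -diff_y))
-- ===== Notes on version B (the rewrite author's own statement) =====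
-- stated objective: alternative
-- what changed: Replaces A's step-by-step while loops (one grid check per visited point) with a closed-form computation of the number of in-grid steps per direction (floor-division bounds per axis, minimum over the two axes) followed by a single comprehension per list; Pre_ excludes only the inputs where A loops forever (both antennas at the same in-grid point), where B raises ValueError.
import Mathlib
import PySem

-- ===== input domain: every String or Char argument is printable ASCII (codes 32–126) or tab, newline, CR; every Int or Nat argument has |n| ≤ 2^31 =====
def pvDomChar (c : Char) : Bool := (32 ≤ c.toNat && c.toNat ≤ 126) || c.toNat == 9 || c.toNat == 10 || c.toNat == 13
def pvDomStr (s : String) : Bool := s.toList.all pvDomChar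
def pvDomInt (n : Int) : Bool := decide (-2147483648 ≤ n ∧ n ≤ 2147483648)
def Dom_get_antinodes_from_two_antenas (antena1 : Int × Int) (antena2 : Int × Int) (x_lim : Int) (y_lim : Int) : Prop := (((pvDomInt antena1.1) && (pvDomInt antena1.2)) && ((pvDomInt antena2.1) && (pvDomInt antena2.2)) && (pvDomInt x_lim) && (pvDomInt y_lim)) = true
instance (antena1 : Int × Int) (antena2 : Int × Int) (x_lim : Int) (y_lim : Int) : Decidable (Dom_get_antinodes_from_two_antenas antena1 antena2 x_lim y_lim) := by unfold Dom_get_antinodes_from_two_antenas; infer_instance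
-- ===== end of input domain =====

-- B replaces A's point-by-point while loops with a closed-form step count per direction
-- and builds each list with one comprehension.

-- ===== PORT A =====
-- helper check_antinode_in_grid, transliterated
def pvCheckAntinodeInGrid (antinode_coord : Int × Int) (x_lim : Int) (y_lim : Int) : Bool :=
  !(antinode_coord.1 < 0 || antinode_coord.2 < 0 || antinode_coord.1 ≥ x_lim || antinode_coord.2 ≥ y_lim)

-- A's while loop (emit point, step by (dx, dy)); the Nat fuel is only a totality guard —
-- Pre_ guarantees Python's loop terminates and the proof shows the fuel exceeds its length.
def pvLoopA (dx dy x_lim y_lim : Int) : Nat → Int × Int → List (Int × Int)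
  | 0, _ => []
  | fuel + 1, p =>
      if pvCheckAntinodeInGrid p x_lim y_lim then
        p :: pvLoopA dx dy x_lim y_lim fuel (p.1 + dx, p.2 + dy)
      else []

def get_antinodes_from_two_antenas (antena1 : Int × Int) (antena2 : Int × Int) (x_lim : Int) (y_lim : Int) : (List (Int × Int)) × (List (Int × Int)) :=
  let x1 := antena1.1; let y1 := antena1.2
  let x2 := antena2.1; let y2 := antena2.2
  let diff_x := x1 - x2
  let diff_y := y1 - y2
  let fuel := (x_lim + y_lim).toNat + 1
  (pvLoopA diff_x diff_y x_lim y_lim fuel (x1 + diff_x, y1 + diff_y),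
   pvLoopA (-diff_x) (-diff_y) x_lim y_lim fuel (x2 - diff_x, y2 - diff_y))

-- ===== PORT B =====
-- axis_count: number of leading steps j = 1, 2, ... with 0 ≤ c + j*s < lim (none = this axis never stops the walk)
def pvAxisCount (c s lim : Int) : Option Int :=
  if s = 0 then (if 0 ≤ c ∧ c < lim then none else some 0)
  else if 0 < s then
    let lo := -(PySem.Int.floordiv c s)
    let hi := PySem.Int.floordiv (lim - 1 - c) s
    some (if lo ≤ 1 ∧ 1 ≤ hi then hi else 0)
  else
    let lo := PySem.Int.floordiv (c - lim) (-s) + 1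
    let hi := PySem.Int.floordiv c (-s)
    some (if lo ≤ 1 ∧ 1 ≤ hi then hi else 0)

-- ray: none = Python B raises ValueError (step (0,0) with the start in grid; outside Pre_)
def pvRay (sx sy dx dy x_lim y_lim : Int) : Option (List (Int × Int)) :=
  match pvAxisCount sx dx x_lim, pvAxisCount sy dy y_lim with
  | none, none => none
  | none, some n => some ((PySem.List.pyRange 1 (n + 1) 1).map (fun j => (sx + j * dx, sy + j * dy)))
  | some n, none => some ((PySem.List.pyRange 1 (n + 1) 1).map (fun j => (sx + j * dx, sy + j * dy)))
  | some nx, some ny =>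
      some ((PySem.List.pyRange 1 (min nx ny + 1) 1).map (fun j => (sx + j * dx, sy + j * dy)))

def get_antinodes_from_two_antenas_alt (antena1 : Int × Int) (antena2 : Int × Int) (x_lim : Int) (y_lim : Int) : (List (Int × Int)) × (List (Int × Int)) :=
  let diff_x := antena1.1 - antena2.1
  let diff_y := antena1.2 - antena2.2
  match pvRay antena1.1 antena1.2 diff_x diff_y x_lim y_lim,
        pvRay antena2.1 antena2.2 (-diff_x) (-diff_y) x_lim y_lim with
  | some l1, some l2 => (l1, l2)
  | _, _ => ([], [])  -- Python B raises ValueError here; excluded by Pre_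

-- ===== PRECONDITION & SPEC =====
-- Pre_ excludes exactly the inputs on which Python A loops forever (never returns):
-- both antennas at the same point and that point inside the grid.
def Pre_get_antinodes_from_two_antenas (antena1 : Int × Int) (antena2 : Int × Int) (x_lim : Int) (y_lim : Int) : Prop :=
  ¬ (antena1 = antena2 ∧ 0 ≤ antena1.1 ∧ antena1.1 < x_lim ∧ 0 ≤ antena1.2 ∧ antena1.2 < y_lim)
instance (antena1 : Int × Int) (antena2 : Int × Int) (x_lim : Int) (y_lim : Int) : Decidable (Pre_get_antinodes_from_two_antenas antena1 antena2 x_lim y_lim) := by unfold Pre_get_antinodes_from_two_antenas; infer_instance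

def pvWitness_get_antinodes_from_two_antenas : (Int × Int) × (Int × Int) × Int × Int := ((0, 0), (1, 1), 3, 3)

def Spec_get_antinodes_from_two_antenas (antena1 : Int × Int) (antena2 : Int × Int) (x_lim : Int) (y_lim : Int) (out : (List (Int × Int)) × (List (Int × Int))) : Prop := out = get_antinodes_from_two_antenas_alt antena1 antena2 x_lim y_lim
instance (antena1 : Int × Int) (antena2 : Int × Int) (x_lim : Int) (y_lim : Int) (out : (List (Int × Int)) × (List (Int × Int))) : Decidable (Spec_get_antinodes_from_two_antenas antena1 antena2 x_lim y_lim out) := by unfold Spec_get_antinodes_from_two_antenas; infer_instance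

-- ===== CLAIM (what is proved, stated in full; the proofs are below) =====
def Claim_equal_get_antinodes_from_two_antenas : Prop := ∀ (antena1 : Int × Int) (antena2 : Int × Int) (x_lim : Int) (y_lim : Int), Dom_get_antinodes_from_two_antenas antena1 antena2 x_lim y_lim → Pre_get_antinodes_from_two_antenas antena1 antena2 x_lim y_lim → Spec_get_antinodes_from_two_antenas antena1 antena2 x_lim y_lim (get_antinodes_from_two_antenas antena1 antena2 x_lim y_lim)

-- ===== LEMMAS AND PROOFS =====

lemma pv_check_iff (p : Int × Int) (xl yl : Int) :
    pvCheckAntinodeInGrid p xl yl = true ↔ (0 ≤ p.1 ∧ p.1 < xl ∧ 0 ≤ p.2 ∧ p.2 < yl) := by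
  simp [pvCheckAntinodeInGrid]; omega

lemma pvAxisCount_none {c s lim : Int} (h : pvAxisCount c s lim = none) :
    s = 0 ∧ 0 ≤ c ∧ c < lim := by
  unfold pvAxisCount at h
  split_ifs at h with h1 h2 h3; simp_all

-- the closed interval [lo, hi] characterizes P; the prefix-from-1 count is then n
lemma pv_interval_prefix {lo hi : Int} {P : Int → Prop} (Hiff : ∀ j, (lo ≤ j ∧ j ≤ hi) ↔ P j) :
    let n := if lo ≤ 1 ∧ 1 ≤ hi then hi else 0
    0 ≤ n ∧ (∀ j, 1 ≤ j → j ≤ n → P j) ∧ ¬ P (n + 1) := by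
  intro n
  by_cases hc : lo ≤ 1 ∧ 1 ≤ hi
  · simp only [n, if_pos hc]
    exact ⟨by omega, fun j h1 h2 => (Hiff j).mp ⟨by omega, h2⟩,
      fun hp => by have := (Hiff _).mpr hp; omega⟩
  · simp only [n, if_neg hc]
    exact ⟨le_refl 0, fun j h1 h2 => absurd h2 (by omega),
      fun hp => by have := (Hiff _).mpr hp; omega⟩

lemma pvAxisCount_some {c s lim n : Int} (h : pvAxisCount c s lim = some n) :
    0 ≤ n ∧ (∀ j : Int, 1 ≤ j → j ≤ n → 0 ≤ c + j * s ∧ c + j * s < lim) ∧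
      (¬ (0 ≤ c + (n + 1) * s ∧ c + (n + 1) * s < lim)) ∧ (s = 0 → n = 0) := by
  unfold pvAxisCount at h
  split_ifs at h with h0 hin hpos
  · -- s = 0, start out of grid, n = 0
    rw [Option.some_inj] at h; subst h; subst h0
    exact ⟨le_refl 0, fun j h1 h2 => absurd h2 (by omega),
      by simpa using hin, fun _ => rfl⟩
  · -- 0 < s
    rw [Option.some_inj] at h
    have Hiff : ∀ j : Int, (-(PySem.Int.floordiv c s) ≤ j ∧ j ≤ PySem.Int.floordiv (lim - 1 - c) s)
        ↔ (0 ≤ c + j * s ∧ c + j * s < lim) := by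
      intro j
      constructor
      · rintro ⟨hl, hu⟩
        have hu' : j * s ≤ lim - 1 - c := (PySem.Int.le_floordiv_iff_mul_le hpos).mp hu
        have hl' : -j * s ≤ c := (PySem.Int.le_floordiv_iff_mul_le hpos).mp (by omega)
        constructor <;> nlinarith
      · rintro ⟨h0c, hlim⟩
        have hu' := (PySem.Int.le_floordiv_iff_mul_le hpos).mpr (show j * s ≤ lim - 1 - c by nlinarith)
        have hl' := (PySem.Int.le_floordiv_iff_mul_le hpos).mpr (show -j * s ≤ c by nlinarith)
        omega
    have := pv_interval_prefix Hiff
    simp only at this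
    rw [h] at this
    exact ⟨this.1, this.2.1, this.2.2, fun hs0 => absurd hs0 h0⟩
  · -- s < 0
    rw [Option.some_inj] at h
    have hneg : 0 < -s := by omega
    have Hiff : ∀ j : Int, (PySem.Int.floordiv (c - lim) (-s) + 1 ≤ j ∧ j ≤ PySem.Int.floordiv c (-s))
        ↔ (0 ≤ c + j * s ∧ c + j * s < lim) := by
      intro j
      constructor
      · rintro ⟨hl, hu⟩
        have hu' : j * -s ≤ c := (PySem.Int.le_floordiv_iff_mul_le hneg).mp hu
        have hl' : c - lim < j * -s := (PySem.Int.floordiv_lt_iff_lt_mul hneg).mp (by omega)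
        constructor <;> nlinarith
      · rintro ⟨h0c, hlim⟩
        have hu' := (PySem.Int.le_floordiv_iff_mul_le hneg).mpr (show j * -s ≤ c by nlinarith)
        have hl' := (PySem.Int.floordiv_lt_iff_lt_mul hneg).mpr (show c - lim < j * -s by nlinarith)
        omega
    have := pv_interval_prefix Hiff
    simp only at this
    rw [h] at this
    exact ⟨this.1, this.2.1, this.2.2, fun hs0 => absurd hs0 h0⟩

-- a bounded axis with nonzero step caps the count by the grid size
lemma pvAxisCount_le {c s lim n : Int} (h : pvAxisCount c s lim = some n) (hs : s ≠ 0) :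
    n = 0 ∨ (1 ≤ n ∧ n ≤ lim) := by
  obtain ⟨h0, hall, -, -⟩ := pvAxisCount_some h
  by_cases hn : n = 0
  · exact Or.inl hn
  · right
    have hn1 : 1 ≤ n := by omega
    obtain ⟨hA1, hA2⟩ := hall 1 le_rfl hn1
    obtain ⟨hB1, hB2⟩ := hall n hn1 le_rfl
    refine ⟨hn1, ?_⟩
    rcases lt_or_gt_of_ne hs with hslt | hsgt
    · nlinarith [mul_le_mul_of_nonneg_left (show (1:Int) ≤ -s by omega) (show (0:Int) ≤ n - 1 by omega)]
    · nlinarith [mul_le_mul_of_nonneg_left (show (1:Int) ≤ s by omega) (show (0:Int) ≤ n - 1 by omega)]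

-- A's loop, run from index k with n in-grid steps ahead and enough fuel, yields the range map
lemma pvLoopA_eq (sx sy dx dy xl yl : Int) :
    ∀ (n fuel : Nat) (k : Int), n < fuel →
      (∀ j : Int, k ≤ j → j < k + n → pvCheckAntinodeInGrid (sx + j * dx, sy + j * dy) xl yl = true) →
      pvCheckAntinodeInGrid (sx + (k + n) * dx, sy + (k + n) * dy) xl yl = false →
      pvLoopA dx dy xl yl fuel (sx + k * dx, sy + k * dy) =
        (PySem.List.pyRange k (k + n) 1).map (fun j => (sx + j * dx, sy + j * dy)) := by
  intro n
  induction n with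
  | zero =>
    intro fuel k hf hall hstop
    obtain ⟨f, rfl⟩ : ∃ f, fuel = f + 1 := ⟨fuel - 1, by omega⟩
    have hstop' : pvCheckAntinodeInGrid (sx + k * dx, sy + k * dy) xl yl = false := by
      simpa using hstop
    have hk : (k + ((0 : Nat) : Int)) = k := by simp
    rw [hk, PySem.List.pyRange_one_eq_nil le_rfl]
    simp [pvLoopA, hstop']
  | succ m ih =>
    intro fuel k hf hall hstop
    obtain ⟨f, rfl⟩ : ∃ f, fuel = f + 1 := ⟨fuel - 1, by omega⟩
    have hk : pvCheckAntinodeInGrid (sx + k * dx, sy + k * dy) xl yl = true :=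
      hall k le_rfl (by push_cast; omega)
    have hstop' : pvCheckAntinodeInGrid (sx + ((k + 1) + (m : Int)) * dx, sy + ((k + 1) + (m : Int)) * dy) xl yl = false := by
      have e : (k + 1) + (m : Int) = k + ((m + 1 : Nat) : Int) := by push_cast; ring
      rw [e]; exact hstop
    have hall' : ∀ j : Int, k + 1 ≤ j → j < (k + 1) + (m : Int) →
        pvCheckAntinodeInGrid (sx + j * dx, sy + j * dy) xl yl = true := by
      intro j hj1 hj2
      exact hall j (by omega) (by push_cast at hj2 ⊢; omega)
    have hrec := ih f (k + 1) (by omega) hall' hstop'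
    have hcons : PySem.List.pyRange k (k + ((m + 1 : Nat) : Int)) 1
        = k :: PySem.List.pyRange (k + 1) (k + ((m + 1 : Nat) : Int)) 1 :=
      PySem.List.pyRange_one_cons (by push_cast; omega)
    have e2 : (k + 1) + (m : Int) = k + ((m + 1 : Nat) : Int) := by push_cast; ring
    rw [e2] at hrec
    simp only [pvLoopA, hk, if_true]
    rw [show (sx + k * dx) + dx = sx + (k + 1) * dx by ring,
        show (sy + k * dy) + dy = sy + (k + 1) * dy by ring]
    rw [hrec, hcons]
    simp

-- the closed-form facts imply the loop equals the comprehension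
lemma pvLoop_closed (sx sy dx dy xl yl n : Int)
    (h0 : 0 ≤ n)
    (hall : ∀ j : Int, 1 ≤ j → j ≤ n →
      (0 ≤ sx + j * dx ∧ sx + j * dx < xl) ∧ (0 ≤ sy + j * dy ∧ sy + j * dy < yl))
    (hstop : ¬ ((0 ≤ sx + (n + 1) * dx ∧ sx + (n + 1) * dx < xl) ∧ (0 ≤ sy + (n + 1) * dy ∧ sy + (n + 1) * dy < yl)))
    (hfuel : n < ((xl + yl).toNat : Int) + 1) :
    pvLoopA dx dy xl yl ((xl + yl).toNat + 1) (sx + dx, sy + dy) =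
      (PySem.List.pyRange 1 (n + 1) 1).map (fun j => (sx + j * dx, sy + j * dy)) := by
  have hn : (n.toNat : Int) = n := Int.toNat_of_nonneg h0
  have h1 : pvLoopA dx dy xl yl ((xl + yl).toNat + 1) (sx + 1 * dx, sy + 1 * dy) =
      (PySem.List.pyRange 1 (1 + (n.toNat : Int)) 1).map (fun j => (sx + j * dx, sy + j * dy)) := by
    apply pvLoopA_eq sx sy dx dy xl yl n.toNat ((xl + yl).toNat + 1) 1 (by omega)
    · intro j hj1 hj2
      rw [hn] at hj2
      rw [pv_check_iff]
      have := hall j hj1 (by omega)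
      exact ⟨this.1.1, this.1.2, this.2.1, this.2.2⟩
    · rw [show (1 : Int) + (n.toNat : Int) = n + 1 by omega]
      rw [← Bool.not_eq_true, pv_check_iff]
      simpa using fun a b c d => hstop ⟨⟨a, b⟩, ⟨c, d⟩⟩
  rw [show sx + 1 * dx = sx + dx by ring, show sy + 1 * dy = sy + dy by ring] at h1
  rw [show (1 : Int) + (n.toNat : Int) = n + 1 by omega] at h1
  exact h1

-- one ray: B's closed-form list is exactly what A's loop produces
lemma pvRay_correct (sx sy dx dy xl yl : Int)
    (hpre : ¬ (dx = 0 ∧ dy = 0 ∧ 0 ≤ sx ∧ sx < xl ∧ 0 ≤ sy ∧ sy < yl)) :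
    pvRay sx sy dx dy xl yl =
      some (pvLoopA dx dy xl yl ((xl + yl).toNat + 1) (sx + dx, sy + dy)) := by
  unfold pvRay
  rcases hx : pvAxisCount sx dx xl with _ | nx <;> rcases hy : pvAxisCount sy dy yl with _ | ny
  · -- both unbounded: contradiction with hpre
    obtain ⟨hdx, hx1, hx2⟩ := pvAxisCount_none hx
    obtain ⟨hdy, hy1, hy2⟩ := pvAxisCount_none hy
    exact absurd ⟨hdx, hdy, hx1, hx2, hy1, hy2⟩ hpre
  · -- x unbounded, y bounded: n = ny
    obtain ⟨hdx, hx1, hx2⟩ := pvAxisCount_none hx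
    obtain ⟨h0, hall, hstop, hzero⟩ := pvAxisCount_some hy
    have hall' : ∀ j : Int, 1 ≤ j → j ≤ ny →
        (0 ≤ sx + j * dx ∧ sx + j * dx < xl) ∧ (0 ≤ sy + j * dy ∧ sy + j * dy < yl) := by
      intro j h1 h2
      refine ⟨⟨?_, ?_⟩, hall j h1 h2⟩ <;> rw [hdx] <;> omega
    have hstop' : ¬ ((0 ≤ sx + (ny + 1) * dx ∧ sx + (ny + 1) * dx < xl) ∧
        (0 ≤ sy + (ny + 1) * dy ∧ sy + (ny + 1) * dy < yl)) := fun hcon => hstop hcon.2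
    have hfuel : ny < ((xl + yl).toNat : Int) + 1 := by
      by_cases hdy0 : dy = 0
      · have := hzero hdy0; omega
      · rcases pvAxisCount_le hy hdy0 with h | ⟨ha, hb⟩ <;> omega
    rw [pvLoop_closed sx sy dx dy xl yl ny h0 hall' hstop' hfuel]
  · -- x bounded, y unbounded: n = nx
    obtain ⟨hdy, hy1, hy2⟩ := pvAxisCount_none hy
    obtain ⟨h0, hall, hstop, hzero⟩ := pvAxisCount_some hx
    have hall' : ∀ j : Int, 1 ≤ j → j ≤ nx →
        (0 ≤ sx + j * dx ∧ sx + j * dx < xl) ∧ (0 ≤ sy + j * dy ∧ sy + j * dy < yl) := by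
      intro j h1 h2
      refine ⟨hall j h1 h2, ?_, ?_⟩ <;> rw [hdy] <;> omega
    have hstop' : ¬ ((0 ≤ sx + (nx + 1) * dx ∧ sx + (nx + 1) * dx < xl) ∧
        (0 ≤ sy + (nx + 1) * dy ∧ sy + (nx + 1) * dy < yl)) := fun hcon => hstop hcon.1
    have hfuel : nx < ((xl + yl).toNat : Int) + 1 := by
      by_cases hdx0 : dx = 0
      · have := hzero hdx0; omega
      · rcases pvAxisCount_le hx hdx0 with h | ⟨ha, hb⟩ <;> omega
    rw [pvLoop_closed sx sy dx dy xl yl nx h0 hall' hstop' hfuel]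
  · -- both bounded: n = min nx ny
    obtain ⟨h0x, hallx, hstopx, hzerox⟩ := pvAxisCount_some hx
    obtain ⟨h0y, hally, hstopy, hzeroy⟩ := pvAxisCount_some hy
    have hall' : ∀ j : Int, 1 ≤ j → j ≤ min nx ny →
        (0 ≤ sx + j * dx ∧ sx + j * dx < xl) ∧ (0 ≤ sy + j * dy ∧ sy + j * dy < yl) := by
      intro j h1 h2
      exact ⟨hallx j h1 (by omega), hally j h1 (by omega)⟩
    have hstop' : ¬ ((0 ≤ sx + (min nx ny + 1) * dx ∧ sx + (min nx ny + 1) * dx < xl) ∧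
        (0 ≤ sy + (min nx ny + 1) * dy ∧ sy + (min nx ny + 1) * dy < yl)) := by
      intro hcon
      rcases min_choice nx ny with hm | hm
      · exact hstopx (by rw [← hm]; exact hcon.1)
      · exact hstopy (by rw [← hm]; exact hcon.2)
    have hfuel : min nx ny < ((xl + yl).toNat : Int) + 1 := by
      by_cases hn : min nx ny ≤ 0
      · omega
      · have hnx1 : 1 ≤ nx := by omega
        have hny1 : 1 ≤ ny := by omega
        have hdx0 : dx ≠ 0 := fun h => by have := hzerox h; omega
        rcases pvAxisCount_le hx hdx0 with h | ⟨-, hb⟩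
        · omega
        · have hy1 := (hally 1 le_rfl hny1).1
          have hy2 := (hally 1 le_rfl hny1).2
          omega
    rw [pvLoop_closed sx sy dx dy xl yl (min nx ny) (by omega) hall' hstop' hfuel]

-- ===== VERDICT (by name: the statement is the Claim_ definition above) =====
theorem get_antinodes_from_two_antenas_spec : Claim_equal_get_antinodes_from_two_antenas := by
  intro a1 a2 xl yl _hdom hpre
  unfold Spec_get_antinodes_from_two_antenas
  unfold Pre_get_antinodes_from_two_antenas at hpre
  unfold get_antinodes_from_two_antenas get_antinodes_from_two_antenas_alt
  have hpre1 : ¬ ((a1.1 - a2.1) = 0 ∧ (a1.2 - a2.2) = 0 ∧ 0 ≤ a1.1 ∧ a1.1 < xl ∧ 0 ≤ a1.2 ∧ a1.2 < yl) := by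
    rintro ⟨e1, e2, h⟩
    exact hpre ⟨Prod.ext (by omega) (by omega), h⟩
  have hpre2 : ¬ ((-(a1.1 - a2.1)) = 0 ∧ (-(a1.2 - a2.2)) = 0 ∧ 0 ≤ a2.1 ∧ a2.1 < xl ∧ 0 ≤ a2.2 ∧ a2.2 < yl) := by
    rintro ⟨e1, e2, h⟩
    exact hpre ⟨Prod.ext (by omega) (by omega), by omega⟩
  have h1 := pvRay_correct a1.1 a1.2 (a1.1 - a2.1) (a1.2 - a2.2) xl yl hpre1
  have h2 := pvRay_correct a2.1 a2.2 (-(a1.1 - a2.1)) (-(a1.2 - a2.2)) xl yl hpre2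
  simp only [h1, h2]
  rw [show a2.1 + -(a1.1 - a2.1) = a2.1 - (a1.1 - a2.1) by ring,
      show a2.2 + -(a1.2 - a2.2) = a2.2 - (a1.2 - a2.2) by ring]
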